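-- pv_equiv track=rewrite | github.com/khuonggminhhoang/PYTHON_PTIT | so_dac_biet_PYKT087.py | solve
-- ===== SOURCE A (Python) =====
-- mod = int(1e9) + 7
--
-- def solve(n, k):
--     ans = 0
--     tmp = 1
--     while k != 0:
--         if k % 2 == 1:
--             ans += tmp
--             ans %= mod
--         k //= 2
--         tmp *= n
--         tmp %= mod
--     return ans
-- ===== SOURCE B (Python) =====
-- mod = int(1e9) + 7
--
-- def solve(n, k):
--     # Horner's method over the binary digits of k, most-significant first.
--     digits = []
--     while k > 0:
--         digits.append(k % 2)
--         k //= 2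
--     res = 0
--     for d in reversed(digits):
--         res = (res * n + d) % mod
--     return res
-- ===== Notes on version B (the rewrite author's own statement) =====
-- stated objective: alternative
-- what changed: Replaces the LSB-first loop that sums a running power tmp=n^i into ans with a two-phase Horner evaluation: collect the binary digits of k, then fold them most-significant-first with res = (res*n + d) % mod.
-- outside the precondition, e.g. on solve(2, -3): A does not finish within the time limit, B returns 0
import Mathlib
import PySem

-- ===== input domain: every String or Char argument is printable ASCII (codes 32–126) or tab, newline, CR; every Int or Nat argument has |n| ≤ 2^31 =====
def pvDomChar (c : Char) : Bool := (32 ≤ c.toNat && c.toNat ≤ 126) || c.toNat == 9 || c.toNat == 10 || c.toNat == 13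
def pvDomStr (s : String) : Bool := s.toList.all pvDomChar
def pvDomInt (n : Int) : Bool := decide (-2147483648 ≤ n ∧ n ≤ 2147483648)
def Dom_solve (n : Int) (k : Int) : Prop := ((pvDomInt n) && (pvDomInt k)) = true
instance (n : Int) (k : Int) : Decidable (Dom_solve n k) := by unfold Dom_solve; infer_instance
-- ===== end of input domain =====

-- B replaces A's LSB-first scan with a running power by a two-phase Horner evaluation
-- (collect binary digits, then fold them MSB-first with a single accumulator); objective: alternative.

-- the module constant: mod = int(1e9) + 7
def pvMod : Int := 1000000007

-- ===== PORT A =====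
-- while k != 0: …   — for k < 0 the Python loop never terminates (k //= 2 stays negative),
-- so the port returns at k ≤ 0 purely as a totality guard; those inputs are outside Pre_solve.
def solveLoopA (n ans tmp k : Int) : Int :=
  if _ : k ≤ 0 then ans
  else
    let ans' := if PySem.Int.mod k 2 = 1 then PySem.Int.mod (ans + tmp) pvMod else ans
    solveLoopA n ans' (PySem.Int.mod (tmp * n) pvMod) (PySem.Int.floordiv k 2)
termination_by k.toNat
decreasing_by
  rw [PySem.Int.floordiv_eq_ediv_of_pos (by omega)]
  omega

def solve (n : Int) (k : Int) : Int := solveLoopA n 0 1 k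

-- ===== PORT B =====
-- while k > 0: digits.append(k % 2); k //= 2
def digitsB (k : Int) : List Int :=
  if _ : k ≤ 0 then []
  else PySem.Int.mod k 2 :: digitsB (PySem.Int.floordiv k 2)
termination_by k.toNat
decreasing_by
  rw [PySem.Int.floordiv_eq_ediv_of_pos (by omega)]
  omega

-- for d in reversed(digits): res = (res * n + d) % mod
def solve_alt (n : Int) (k : Int) : Int :=
  (digitsB k).reverse.foldl (fun res d => PySem.Int.mod (res * n + d) pvMod) 0

-- ===== PRECONDITION & SPEC =====
-- Pre_ excludes k < 0, on which A's while loop never terminates (k //= 2 never reaches 0).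
def Pre_solve (n : Int) (k : Int) : Prop := 0 ≤ k
instance (n : Int) (k : Int) : Decidable (Pre_solve n k) := by unfold Pre_solve; infer_instance

def pvWitness_solve : Int × Int := (3, 11)

def Spec_solve (n : Int) (k : Int) (out : Int) : Prop := out = solve_alt n k
instance (n : Int) (k : Int) (out : Int) : Decidable (Spec_solve n k out) := by unfold Spec_solve; infer_instance

-- ===== CLAIM (what is proved, stated in full; the proofs are below) =====
def Claim_equal_solve : Prop := ∀ (n : Int) (k : Int), Dom_solve n k → Pre_solve n k → Spec_solve n k (solve n k)

-- ===== LEMMAS AND PROOFS =====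

lemma pvMod_pos : (0:Int) < pvMod := by unfold pvMod; norm_num

-- PySem.Int.mod x pvMod is already reduced: x % M ≡ x (mod M)
lemma mod_modEq (x : Int) : PySem.Int.mod x pvMod ≡ x [ZMOD pvMod] := by
  rw [PySem.Int.mod_eq_emod_of_pos pvMod_pos]
  exact Int.emod_emod_of_dvd _ dvd_rfl

-- B's value, unfolded one binary digit: for k > 0 it is (solve_alt n (k//2) * n + k%2) % mod.
lemma solve_alt_pos (n k : Int) (hk : 0 < k) :
    solve_alt n k =
      PySem.Int.mod (solve_alt n (PySem.Int.floordiv k 2) * n + PySem.Int.mod k 2) pvMod := by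
  unfold solve_alt
  rw [digitsB, dif_neg (by omega)]
  simp [List.foldl_append]

lemma solve_alt_nonpos (n k : Int) (hk : k ≤ 0) : solve_alt n k = 0 := by
  unfold solve_alt
  rw [digitsB, dif_pos hk]
  rfl

lemma solve_alt_emod (n k : Int) : solve_alt n k % pvMod = solve_alt n k := by
  rcases le_or_gt k 0 with h | h
  · rw [solve_alt_nonpos n k h]; rfl
  · rw [solve_alt_pos n k h, PySem.Int.mod_eq_emod_of_pos pvMod_pos]
    exact Int.emod_emod_of_dvd _ dvd_rfl

-- loop invariant for A: with a reduced accumulator, the loop returns (ans + tmp * solve_alt n k) % mod.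
lemma loopA_eq (n : Int) : ∀ (m : Nat) (k ans tmp : Int), k.toNat = m → 0 ≤ k →
    ans % pvMod = ans →
    solveLoopA n ans tmp k = (ans + tmp * solve_alt n k) % pvMod := by
  intro m
  induction m using Nat.strong_induction_on with
  | _ m ih =>
    intro k ans tmp hm hk hans
    rcases le_or_gt k 0 with h | h
    · rw [solveLoopA, dif_pos h, solve_alt_nonpos n k h]
      simpa using hans.symm
    · rw [solveLoopA, dif_neg (by omega)]
      have hfd : PySem.Int.floordiv k 2 = k / 2 := PySem.Int.floordiv_eq_ediv_of_pos (by norm_num)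
      have hmd : PySem.Int.mod k 2 = k % 2 := PySem.Int.mod_eq_emod_of_pos (by norm_num)
      have hlt : (k / 2).toNat < m := by rw [hfd] at *; omega
      set ans' := if PySem.Int.mod k 2 = 1 then PySem.Int.mod (ans + tmp) pvMod else ans with hans'
      have hans'mod : ans' % pvMod = ans' := by
        rw [hans']
        split_ifs with hb
        · rw [PySem.Int.mod_eq_emod_of_pos pvMod_pos]
          exact Int.emod_emod_of_dvd _ dvd_rfl
        · exact hans
      rw [ih _ hlt (PySem.Int.floordiv k 2) ans' (PySem.Int.mod (tmp * n) pvMod)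
            (by rw [hfd]) (by rw [hfd]; omega) hans'mod]
      -- both sides reduce mod pvMod to ans + tmp * (k % 2) + tmp * n * solve_alt n (k/2)
      rw [solve_alt_pos n k h, hfd, hmd]
      have hbit : ans' ≡ ans + tmp * (k % 2) [ZMOD pvMod] := by
        rw [hans', hmd]
        have h2 : k % 2 = 0 ∨ k % 2 = 1 := Int.emod_two_eq_zero_or_one k
        rcases h2 with h2 | h2 <;> rw [h2] <;> simp [PySem.Int.mod_eq_emod_of_pos pvMod_pos]
        exact (Int.emod_emod_of_dvd _ dvd_rfl)
      have htmp := mod_modEq (tmp * n)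
      have hS := mod_modEq (solve_alt n (k / 2) * n + k % 2)
      have hL : ans' + PySem.Int.mod (tmp * n) pvMod * solve_alt n (k / 2)
          ≡ ans + tmp * (solve_alt n (k / 2) * n + k % 2) [ZMOD pvMod] := by
        calc ans' + PySem.Int.mod (tmp * n) pvMod * solve_alt n (k / 2)
            ≡ (ans + tmp * (k % 2)) + (tmp * n) * solve_alt n (k / 2) [ZMOD pvMod] :=
              Int.ModEq.add hbit (Int.ModEq.mul_right _ htmp)
          _ = ans + tmp * (solve_alt n (k / 2) * n + k % 2) := by ring
      have := hL.trans (Int.ModEq.add_left ans (Int.ModEq.mul_left tmp hS.symm))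
      exact this

-- ===== VERDICT (by name: the statement is the Claim_ definition above) =====
theorem solve_spec : Claim_equal_solve := by
  intro n k _ hk
  unfold Spec_solve solve
  rw [loopA_eq n k.toNat k 0 1 rfl hk (by rfl)]
  simpa using solve_alt_emod n k
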